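-- pv_equiv track=rewrite | github.com/ankurdivekar/squarepair | src/sort_overlapping_lists.py | sort_by_greedy
-- ===== SOURCE A (Python) =====
-- from typing import List, Tuple
--
-- def count_common_pairs(list1: List[Tuple[int, int]], list2: List[Tuple[int, int]]) -> int:
--     """
--     Count the number of common pairs between two lists.
--     Considers (a, b) and (b, a) as the same pair.
--
--     Parameters
--     ----------
--     list1, list2 : List of tuples
--         Lists of number pairs to compare
--
--     Returns
--     -------
--     int
--         Number of common pairs
--
--     Examples
--     --------
--     >>> count_common_pairs([(1, 2), (3, 4)], [(2, 1), (5, 6)])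
--     1  # (1,2) matches (2,1)
--     """
--     # Normalize pairs so (a, b) and (b, a) are treated the same
--     set1 = {tuple(sorted(pair)) for pair in list1}
--     set2 = {tuple(sorted(pair)) for pair in list2}
--     return len(set1 & set2)
--
-- def sort_by_greedy(lists: List[List[Tuple[int, int]]]) -> List[List[Tuple[int, int]]]:
--     """
--     Sort lists using a greedy algorithm.
--     Start with any list, then repeatedly pick the unused list with maximum overlap.
--
--     Fast but not guaranteed optimal. Good for large numbers of lists (100+).
--
--     Parameters
--     ----------
--     lists : List of lists of tuples
--         Lists to sort
--
--     Returns
--     -------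
--     List of lists
--         Sorted lists maximizing consecutive overlap
--
--     Examples
--     --------
--     >>> lists = [[(1,2), (3,4)], [(2,1), (5,6)], [(5,6), (7,8)]]
--     >>> sorted_lists = sort_by_greedy(lists)
--     """
--     if len(lists) <= 1:
--         return lists.copy()
--
--     result = [lists[0]]
--     remaining = set(range(1, len(lists)))
--
--     while remaining:
--         current = result[-1]
--         best_idx = None
--         best_overlap = -1
--
--         # Find the remaining list with maximum overlap
--         for idx in remaining:
--             overlap = count_common_pairs(current, lists[idx])
--             if overlap > best_overlap:
--                 best_overlap = overlap
--                 best_idx = idx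
--
--         result.append(lists[best_idx])
--         remaining.remove(best_idx)
--
--     return result
-- ===== SOURCE B (Python) =====
-- from typing import List, Tuple
--
-- def sort_by_greedy(lists: List[List[Tuple[int, int]]]) -> List[List[Tuple[int, int]]]:
--     n = len(lists)
--     if n <= 1:
--         return lists.copy()
--
--     # Normalize every list ONCE into a set of order-insensitive pairs.
--     norm = [{tuple(sorted(p)) for p in lst} for lst in lists]
--
--     # Inverted index: normalized pair -> ascending indices of lists containing it.
--     index = {}
--     for i, s in enumerate(norm):
--         for p in s:
--             index.setdefault(p, []).append(i)
--
--     order = [0]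
--     remaining = [False] + [True] * (n - 1)
--     cur = 0
--     for _ in range(n - 1):
--         # Overlap counts for ALL lists via the inverted index.
--         counts = [0] * n
--         for p in norm[cur]:
--             for j in index[p]:
--                 counts[j] += 1
--         best_idx = -1
--         best_overlap = -1
--         for j in range(1, n):
--             if remaining[j] and counts[j] > best_overlap:
--                 best_overlap = counts[j]
--                 best_idx = j
--         order.append(best_idx)
--         remaining[best_idx] = False
--         cur = best_idx
--     return [lists[i] for i in order]
-- ===== Notes on version B (the rewrite author's own statement) =====
-- stated objective: faster
-- what changed: B normalizes every pair-list once and builds an inverted index mapping each normalized pair to the lists containing it; per greedy step it accumulates overlap counts by bucket increments instead of recomputing a set intersection against every remaining list, keeping the same smallest-index tie-break.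
import Mathlib
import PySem

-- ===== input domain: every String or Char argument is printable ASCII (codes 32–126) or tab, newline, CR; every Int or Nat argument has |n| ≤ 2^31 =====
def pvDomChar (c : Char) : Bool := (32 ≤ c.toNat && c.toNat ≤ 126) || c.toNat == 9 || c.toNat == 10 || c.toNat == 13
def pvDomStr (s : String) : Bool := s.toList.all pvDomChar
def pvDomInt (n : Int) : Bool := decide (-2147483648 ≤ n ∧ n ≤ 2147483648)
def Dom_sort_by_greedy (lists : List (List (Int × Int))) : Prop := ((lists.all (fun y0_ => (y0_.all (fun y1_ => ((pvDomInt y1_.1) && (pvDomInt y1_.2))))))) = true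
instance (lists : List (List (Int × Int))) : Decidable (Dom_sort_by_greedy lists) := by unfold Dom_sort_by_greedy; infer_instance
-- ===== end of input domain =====

-- B builds the normalized pair-sets once plus an inverted index (pair → lists containing it)
-- and counts overlaps by bucket increments, instead of A's per-step set intersection against
-- every remaining list; the greedy order and smallest-index tie-break are identical.
-- Note: CPython iterates A's `remaining` set of small contiguous ints in ascending order;
-- the port of A uses that ascending order.

-- ===== PORT A =====
-- tuple(sorted(pair)) for a 2-tuple
def pvNormPair (p : Int × Int) : Int × Int := if p.1 ≤ p.2 then p else (p.2, p.1)

def count_common_pairs (list1 list2 : List (Int × Int)) : Int :=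
  let set1 : PySem.Set (Int × Int) := PySem.Set.ofList (list1.map pvNormPair)
  let set2 : PySem.Set (Int × Int) := PySem.Set.ofList (list2.map pvNormPair)
  ((PySem.Set.inter set1 set2).length : Int)

-- the inner `for idx in remaining` selection loop (remaining iterated in ascending order)
def pvSelA (lists : List (List (Int × Int))) (current : List (Int × Int))
    (remaining : List Nat) : Option Nat × Int :=
  remaining.foldl (fun st idx =>
    let overlap := count_common_pairs current (lists.getD idx [])
    if overlap > st.2 then (some idx, overlap) else st) (none, -1)

-- the `while remaining:` loop; fuel = initial number of lists bounds the iterations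
def pvLoopA (lists : List (List (Int × Int))) :
    Nat → List (Int × Int) → List Nat → List (List (Int × Int)) → List (List (Int × Int))
  | 0, _, _, result => result
  | fuel + 1, current, remaining, result =>
    if remaining.isEmpty then result
    else
      match pvSelA lists current remaining with
      | (none, _) => result   -- unreachable: remaining nonempty forces best_idx = some _
      | (some b, _) =>
          pvLoopA lists fuel (lists.getD b []) (remaining.erase b) (result ++ [lists.getD b []])

def sort_by_greedy (lists : List (List (Int × Int))) : List (List (Int × Int)) :=
  if lists.length ≤ 1 then lists
  else pvLoopA lists lists.length (lists.getD 0 []) (List.range' 1 (lists.length - 1))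
        [lists.getD 0 []]

-- ===== PORT B =====
-- norm = [{tuple(sorted(p)) for p in lst} for lst in lists]
def pvNormSets (lists : List (List (Int × Int))) : List (PySem.Set (Int × Int)) :=
  lists.map (fun lst => PySem.Set.ofList (lst.map pvNormPair))

-- index.setdefault(p, []).append(i) over enumerate(norm)
def pvIndex (norm : List (PySem.Set (Int × Int))) : PySem.Dict (Int × Int) (List Nat) :=
  norm.zipIdx.foldl (fun d si =>
    si.1.foldl (fun d p => d.insert p (d.getD p [] ++ [si.2])) d) PySem.Dict.empty

-- counts = [0]*n; for p in norm[cur]: for j in index[p]: counts[j] += 1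
def pvCounts (n : Nat) (index : PySem.Dict (Int × Int) (List Nat))
    (s : PySem.Set (Int × Int)) : List Int :=
  s.foldl (fun counts p =>
    (index.getD p []).foldl (fun counts j => counts.set j (counts.getD j 0 + 1)) counts)
    (List.replicate n 0)

-- for j in range(1, n): if remaining[j] and counts[j] > best_overlap: ...
def pvSelB (n : Nat) (remaining : List Bool) (counts : List Int) : Int × Int :=
  (List.range' 1 (n - 1)).foldl (fun st j =>
    if remaining.getD j false && decide (counts.getD j 0 > st.2) then ((j : Int), counts.getD j 0)
    else st) (-1, -1)

-- for _ in range(n-1): ...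
def pvLoopB (norm : List (PySem.Set (Int × Int))) (index : PySem.Dict (Int × Int) (List Nat))
    (n : Nat) : Nat → Nat → List Bool → List Nat → List Nat
  | 0, _, _, order => order
  | fuel + 1, cur, remaining, order =>
      let counts := pvCounts n index (norm.getD cur [])
      let best := (pvSelB n remaining counts).1.toNat
      pvLoopB norm index n fuel best (remaining.set best false) (order ++ [best])

def sort_by_greedy_alt (lists : List (List (Int × Int))) : List (List (Int × Int)) :=
  let n := lists.length
  if n ≤ 1 then lists
  else
    let norm := pvNormSets lists
    let index := pvIndex norm
    (pvLoopB norm index n (n - 1) 0 (false :: List.replicate (n - 1) true) [0]).map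
      (fun i => lists.getD i [])

-- ===== PRECONDITION & SPEC =====
def Spec_sort_by_greedy (lists : List (List (Int × Int))) (out : List (List (Int × Int))) : Prop := out = sort_by_greedy_alt lists
instance (lists : List (List (Int × Int))) (out : List (List (Int × Int))) : Decidable (Spec_sort_by_greedy lists out) := by unfold Spec_sort_by_greedy; infer_instance

-- ===== CLAIM (what is proved, stated in full; the proofs are below) =====
def Claim_equal_sort_by_greedy : Prop := ∀ (lists : List (List (Int × Int))), Dom_sort_by_greedy lists → Spec_sort_by_greedy lists (sort_by_greedy lists)

-- ===== LEMMAS AND PROOFS =====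

-- getD of List.set
theorem lem_getD_set {α : Type} (l : List α) (i j : Nat) (a d : α) :
    (l.set i a).getD j d = if i = j ∧ i < l.length then a else l.getD j d := by
  simp only [List.getD_eq_getElem?_getD, List.getElem?_set]
  split_ifs <;> simp_all
  omega

-- getD of replicate
theorem lem_getD_replicate {α : Type} (n i : Nat) (a d : α) :
    (List.replicate n a).getD i d = if i < n then a else d := by
  simp only [List.getD_eq_getElem?_getD, List.getElem?_replicate]
  split_ifs <;> simp_all

-- the inner `for p in s: index.setdefault(p, []).append(i)` fold, for a duplicate-free s
theorem lem_inner (i : Nat) (s : List (Int × Int)) (hs : s.Nodup)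
    (d : PySem.Dict (Int × Int) (List Nat)) (p : Int × Int) :
    (s.foldl (fun d q => d.insert q (d.getD q [] ++ [i])) d).getD p []
      = if p ∈ s then d.getD p [] ++ [i] else d.getD p [] := by
  induction s generalizing d with
  | nil => simp
  | cons q t ih =>
    simp only [List.foldl_cons]
    rw [ih (by simp_all [List.nodup_cons])]
    by_cases hpq : p = q
    · subst hpq
      have : p ∉ t := by simp_all [List.nodup_cons]
      simp [this]
    · by_cases hpt : p ∈ t <;>
        simp [hpq, hpt, PySem.Dict.getD_insert_of_ne _ _ _ hpq]

-- the outer fold over enumerate(norm): each bucket in the index is the (second components of)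
-- the enumerated sets containing the key
theorem lem_outer (sets : List (PySem.Set (Int × Int))) (h : ∀ s ∈ sets, List.Nodup s)
    (d : PySem.Dict (Int × Int) (List Nat)) (k : Nat) (p : Int × Int) :
    ((sets.zipIdx k).foldl (fun d si =>
        si.1.foldl (fun d q => d.insert q (d.getD q [] ++ [si.2])) d) d).getD p []
      = d.getD p [] ++ ((sets.zipIdx k).filter (fun si => decide (p ∈ si.1))).map Prod.snd := by
  induction sets generalizing d k with
  | nil => simp
  | cons s t ih =>
    simp only [List.zipIdx_cons, List.foldl_cons, List.filter_cons]
    rw [ih (fun s hs => h s (List.mem_cons_of_mem _ hs))]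
    rw [lem_inner k s (h s (List.mem_cons_self)) d p]
    by_cases hp : p ∈ s <;> simp [hp]

theorem lem_bucket (norm : List (PySem.Set (Int × Int))) (h : ∀ s ∈ norm, List.Nodup s)
    (p : Int × Int) :
    (pvIndex norm).getD p []
      = (norm.zipIdx.filter (fun si => decide (p ∈ si.1))).map Prod.snd := by
  unfold pvIndex
  rw [lem_outer norm h PySem.Dict.empty 0 p]
  rfl

theorem lem_snd_zipIdx {α : Type} (l : List α) (k : Nat) :
    (l.zipIdx k).map Prod.snd = List.range' k l.length := by
  induction l generalizing k <;> simp_all [List.range'_succ]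

theorem lem_bucket_nodup (norm : List (PySem.Set (Int × Int)))
    (h : ∀ s ∈ norm, List.Nodup s) (p : Int × Int) :
    ((pvIndex norm).getD p []).Nodup := by
  rw [lem_bucket norm h p]
  have hsub : (norm.zipIdx.filter (fun si => decide (p ∈ si.1))).Sublist norm.zipIdx :=
    List.filter_sublist
  have := (hsub.map Prod.snd).nodup (l₂ := norm.zipIdx.map Prod.snd)
  rw [lem_snd_zipIdx] at this
  exact this (List.nodup_range' 1)

theorem lem_bucket_mem (norm : List (PySem.Set (Int × Int)))
    (h : ∀ s ∈ norm, List.Nodup s) (p : Int × Int) (j : Nat) :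
    j ∈ (pvIndex norm).getD p [] ↔ j < norm.length ∧ p ∈ norm.getD j [] := by
  rw [lem_bucket norm h p]
  simp only [List.mem_map, List.mem_filter, Prod.exists]
  constructor
  · rintro ⟨s, i, ⟨hmem, hdec⟩, rfl⟩
    have hget := List.mk_mem_zipIdx_iff_getElem?.mp hmem
    obtain ⟨hi, hsi⟩ := List.getElem?_eq_some_iff.mp hget
    refine ⟨hi, ?_⟩
    rw [List.getD_eq_getElem?_getD, hget]
    simpa using hdec
  · rintro ⟨hj, hp⟩
    refine ⟨norm[j], j,
      ⟨List.mk_mem_zipIdx_iff_getElem?.mpr (List.getElem?_eq_getElem hj), ?_⟩, rfl⟩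
    rw [List.getD_eq_getElem?_getD, List.getElem?_eq_getElem hj] at hp
    simpa using hp

-- counts[j] += 1 over a bucket adds the bucket's multiplicity of q
theorem lem_incr (js : List Nat) (c : List Int) (q : Nat) (hq : q < c.length)
    (hjs : ∀ j ∈ js, j < c.length) :
    ((js.foldl (fun c j => c.set j (c.getD j 0 + 1)) c).getD q 0)
      = c.getD q 0 + (js.count q : Int) := by
  induction js generalizing c with
  | nil => simp
  | cons j t ih =>
    simp only [List.foldl_cons]
    rw [ih (c.set j (c.getD j 0 + 1)) (by simpa using hq)
        (fun x hx => by simpa using hjs x (List.mem_cons_of_mem _ hx))]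
    rw [lem_getD_set]
    by_cases hjq : j = q
    · subst hjq
      simp [hjs j List.mem_cons_self]
      ring
    · simp [hjq]

theorem lem_len_incr (js : List Nat) (c : List Int) :
    (js.foldl (fun c j => c.set j (c.getD j 0 + 1)) c).length = c.length := by
  induction js generalizing c <;> simp_all

-- a duplicate-free list counts an element 0 or 1 times
theorem lem_count_nodup (js : List Nat) (h : js.Nodup) (q : Nat) :
    js.count q = if q ∈ js then 1 else 0 := by
  split_ifs with hm
  · exact List.count_eq_one_of_mem h hm
  · exact List.count_eq_zero.mpr hm

-- the per-step counts array holds exactly the overlap of s with each list's pair set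
theorem lem_counts (norm : List (PySem.Set (Int × Int))) (h : ∀ s ∈ norm, List.Nodup s)
    (s : List (Int × Int)) (q : Nat) (hq : q < norm.length) :
    (pvCounts norm.length (pvIndex norm) s).getD q 0
      = (s.countP (fun p => decide (p ∈ norm.getD q [])) : Int) := by
  unfold pvCounts
  suffices H : ∀ c : List Int, c.length = norm.length →
      (s.foldl (fun counts p =>
        ((pvIndex norm).getD p []).foldl
          (fun counts j => counts.set j (counts.getD j 0 + 1)) counts) c).getD q 0
        = c.getD q 0 + (s.countP (fun p => decide (p ∈ norm.getD q [])) : Int) by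
    rw [H (List.replicate norm.length 0) (by simp)]
    rw [lem_getD_replicate]
    simp [hq]
  induction s with
  | nil => simp
  | cons p t ih =>
    intro c hc
    simp only [List.foldl_cons]
    rw [ih _ (by rw [lem_len_incr]; exact hc)]
    rw [lem_incr _ _ _ (hc ▸ hq) (fun j hj => hc ▸ ((lem_bucket_mem norm h p j).mp hj).1)]
    rw [lem_count_nodup _ (lem_bucket_nodup norm h p) q]
    rw [List.countP_cons]
    have hiff : q ∈ (pvIndex norm).getD p [] ↔ p ∈ norm.getD q [] := by
      rw [lem_bucket_mem norm h p q]; exact ⟨fun x => x.2, fun x => ⟨hq, x⟩⟩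
    simp [hiff]
    split_ifs <;> omega

-- count_common_pairs as a countP over the normalized set of its first argument
theorem lem_ccp (l1 l2 : List (Int × Int)) :
    count_common_pairs l1 l2
      = ((PySem.Set.ofList (l1.map pvNormPair)).countP
          (fun p => decide (p ∈ PySem.Set.ofList (l2.map pvNormPair))) : Int) := by
  simp only [count_common_pairs, PySem.Set.inter]
  have hf : List.filter (fun x => (PySem.Set.ofList (l2.map pvNormPair)).contains x)
        (PySem.Set.ofList (l1.map pvNormPair))
      = List.filter (fun p => decide (p ∈ PySem.Set.ofList (l2.map pvNormPair)))
        (PySem.Set.ofList (l1.map pvNormPair)) := by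
    apply List.filter_congr
    intro x _
    simp [PySem.Set.contains]
  rw [hf, ← List.countP_eq_length_filter]

theorem lem_norm_getD (lists : List (List (Int × Int))) (i : Nat) (hi : i < lists.length) :
    (pvNormSets lists).getD i [] = PySem.Set.ofList ((lists.getD i []).map pvNormPair) := by
  unfold pvNormSets
  rw [List.getD_eq_getElem?_getD, List.getD_eq_getElem?_getD, List.getElem?_map,
      List.getElem?_eq_getElem hi]
  rfl

theorem lem_norm_nodup (lists : List (List (Int × Int))) :
    ∀ s ∈ pvNormSets lists, List.Nodup s := by
  intro s hs
  unfold pvNormSets at hs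
  obtain ⟨l, -, rfl⟩ := List.mem_map.mp hs
  exact PySem.Set.nodup_ofList _

-- pointwise: A's overlap of current with lists[j] equals B's counts[j]
theorem lem_overlap (lists : List (List (Int × Int))) (cur j : Nat)
    (hc : cur < lists.length) (hj : j < lists.length) :
    count_common_pairs (lists.getD cur []) (lists.getD j [])
      = (pvCounts lists.length (pvIndex (pvNormSets lists))
          ((pvNormSets lists).getD cur [])).getD j 0 := by
  have hn : (pvNormSets lists).length = lists.length := by simp [pvNormSets]
  rw [lem_ccp, ← lem_norm_getD lists cur hc, ← lem_norm_getD lists j hj, ← hn]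
  exact (lem_counts (pvNormSets lists) (lem_norm_nodup lists) _ j
    (by rw [hn]; exact hj)).symm

-- the two selection folds advance in lock-step
theorem lem_sel (ov ov' : Nat → Int) (p : Nat → Bool) (L : List Nat)
    (hov : ∀ j ∈ L, p j = true → ov' j = ov j) :
    ∀ (o : Option Nat) (v bi : Int),
    ((o = none ∧ bi = -1) ∨ (∃ b : Nat, o = some b ∧ bi = (b : Int))) →
    (((L.filter p).foldl (fun st idx =>
        if ov' idx > st.2 then (some idx, ov' idx) else st) (o, v)).2
      = (L.foldl (fun st j =>
        if p j && decide (ov j > st.2) then ((j : Int), ov j) else st) (bi, v)).2)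
    ∧ ((((L.filter p).foldl (fun st idx =>
          if ov' idx > st.2 then (some idx, ov' idx) else st) (o, v)).1 = none
        ∧ (L.foldl (fun st j =>
          if p j && decide (ov j > st.2) then ((j : Int), ov j) else st) (bi, v)).1 = -1)
      ∨ (∃ b : Nat, ((L.filter p).foldl (fun st idx =>
          if ov' idx > st.2 then (some idx, ov' idx) else st) (o, v)).1 = some b
        ∧ (L.foldl (fun st j =>
          if p j && decide (ov j > st.2) then ((j : Int), ov j) else st) (bi, v)).1 = (b : Int))) := by
  induction L with
  | nil =>
    intro o v bi hrel
    simpa using hrel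
  | cons j t ih =>
    intro o v bi hrel
    have hov' := fun x hx hp => hov x (List.mem_cons_of_mem _ hx) hp
    by_cases hp : p j
    · have heq : ov' j = ov j := hov j List.mem_cons_self hp
      rw [List.filter_cons, if_pos hp]
      simp only [List.foldl_cons]
      by_cases hgt : ov j > v
      · have e1 : (if ov' j > (o, v).2 then (some j, ov' j) else (o, v)) = (some j, ov j) := by
          rw [heq]; exact if_pos hgt
        have e2 : (if p j && decide (ov j > (bi, v).2) then (((j : Nat) : Int), ov j) else (bi, v))
            = (((j : Nat) : Int), ov j) := by
          simp [hp, hgt]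
        rw [e1, e2]
        exact ih hov' (some j) (ov j) ((j : Nat) : Int) (Or.inr ⟨j, rfl, rfl⟩)
      · have e1 : (if ov' j > (o, v).2 then (some j, ov' j) else (o, v)) = (o, v) := by
          rw [heq]; exact if_neg hgt
        have e2 : (if p j && decide (ov j > (bi, v).2) then (((j : Nat) : Int), ov j) else (bi, v))
            = (bi, v) := by
          simp [hp, hgt]
        rw [e1, e2]
        exact ih hov' o v bi hrel
    · rw [List.filter_cons, if_neg hp]
      simp only [List.foldl_cons]
      have e2 : (if p j && decide (ov j > (bi, v).2) then (((j : Nat) : Int), ov j) else (bi, v))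
          = (bi, v) := by
        simp [hp]
      rw [e2]
      exact ih hov' o v bi hrel

-- A's selection keeps a `some` once it has one
theorem lem_fold_keep (ov' : Nat → Int) (L : List Nat) :
    ∀ st : Option Nat × Int, st.1.isSome →
    ((L.foldl (fun st idx =>
        if ov' idx > st.2 then (some idx, ov' idx) else st) st).1).isSome := by
  induction L with
  | nil => intro st h; simpa using h
  | cons j t ih =>
    intro st h
    simp only [List.foldl_cons]
    by_cases hgt : ov' j > st.2
    · exact ih _ (by simp [hgt])
    · rw [if_neg hgt]; exact ih st h

-- on a nonempty list of candidates with nonnegative overlaps, A selects something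
theorem lem_sel_some (ov' : Nat → Int) (hnn : ∀ j, 0 ≤ ov' j) (L : List Nat) (hL : L ≠ []) :
    ((L.foldl (fun st idx =>
        if ov' idx > st.2 then (some idx, ov' idx) else st) ((none : Option Nat), -1)).1).isSome := by
  cases L with
  | nil => exact absurd rfl hL
  | cons j t =>
    simp only [List.foldl_cons]
    have : ov' j > (-1 : Int) := lt_of_lt_of_le (by norm_num) (hnn j)
    rw [if_pos this]
    exact lem_fold_keep ov' t _ rfl

-- whatever A selects was among the candidates
theorem lem_sel_mem (ov' : Nat → Int) (L : List Nat) (b : Nat) :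
    ∀ st : Option Nat × Int,
    ((L.foldl (fun st idx =>
        if ov' idx > st.2 then (some idx, ov' idx) else st) st).1) = some b →
    st.1 = some b ∨ b ∈ L := by
  induction L with
  | nil => intro st h; exact Or.inl h
  | cons j t ih =>
    intro st h
    simp only [List.foldl_cons] at h
    by_cases hgt : ov' j > st.2
    · rw [if_pos hgt] at h
      rcases ih _ h with h' | h'
      · simp at h'; exact Or.inr (by simp [h'])
      · exact Or.inr (List.mem_cons_of_mem _ h')
    · rw [if_neg hgt] at h
      rcases ih _ h with h' | h'
      · exact Or.inl h'
      · exact Or.inr (List.mem_cons_of_mem _ h')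

theorem lem_ccp_nonneg (l1 l2 : List (Int × Int)) : 0 ≤ count_common_pairs l1 l2 := by
  unfold count_common_pairs
  positivity

-- erasing the selected index from the filtered list = filtering with the updated mask
theorem lem_erase_filter (L : List Nat) (hL : L.Nodup) (q : Nat → Bool) (b : Nat) :
    (L.filter q).erase b = L.filter (fun j => if j = b then false else q j) := by
  induction L with
  | nil => simp
  | cons j t ih =>
    have hnd : t.Nodup := (List.nodup_cons.mp hL).2
    have hnm : j ∉ t := (List.nodup_cons.mp hL).1
    simp only [List.filter_cons]
    by_cases hjb : j = b
    · subst hjb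
      have hqt : t.filter (fun x => if x = j then false else q x) = t.filter q :=
        List.filter_congr (fun x hx => by
          have : x ≠ j := fun h => hnm (h ▸ hx)
          simp [this])
      by_cases hq : q j = true
      · rw [if_pos hq, if_neg (by simp), List.erase_cons_head, hqt]
      · rw [if_neg hq, if_neg (by simp),
          List.erase_of_not_mem (fun hmem => hnm (List.mem_of_mem_filter hmem)), hqt]
    · by_cases hq : q j = true
      · rw [if_pos hq, if_pos (by simp [hjb, hq]), List.erase_cons_tail (by simp [hjb]),
          ih hnd]
      · rw [if_neg hq, if_neg (by simp [hjb, hq]), ih hnd]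

-- the order accumulator of B's loop is a prefix
theorem lem_loopB_shift (norm : List (PySem.Set (Int × Int)))
    (index : PySem.Dict (Int × Int) (List Nat)) (n : Nat) :
    ∀ (f cur : Nat) (mask : List Bool) (order : List Nat),
    pvLoopB norm index n f cur mask order = order ++ pvLoopB norm index n f cur mask [] := by
  intro f
  induction f with
  | zero => intro cur mask order; simp [pvLoopB]
  | succ f ih =>
    intro cur mask order
    simp only [pvLoopB]
    rw [ih _ _ (order ++ [_]), ih _ _ ([] ++ [_])]
    simp

-- the main loop invariant: A's while-loop over the remaining ascending index list tracks
-- B's counted loop over the boolean mask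
theorem lem_main (lists : List (List (Int × Int))) :
    ∀ (f k : Nat) (mask : List Bool) (cur : Nat) (result : List (List (Int × Int))),
    mask.length = lists.length → cur < lists.length →
    ((List.range' 1 (lists.length - 1)).filter (fun j => mask.getD j false)).length = f →
    pvLoopA lists (f + k) (lists.getD cur [])
        ((List.range' 1 (lists.length - 1)).filter (fun j => mask.getD j false)) result
      = result ++ (pvLoopB (pvNormSets lists) (pvIndex (pvNormSets lists)) lists.length
          f cur mask []).map (fun i => lists.getD i []) := by
  intro f
  induction f with
  | zero =>
    intro k mask cur result hm hc hf
    have hnil : (List.range' 1 (lists.length - 1)).filter (fun j => mask.getD j false) = [] :=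
      List.eq_nil_of_length_eq_zero hf
    rw [hnil]
    cases k <;> simp [pvLoopA, pvLoopB]
  | succ f ih =>
    intro k mask cur result hm hc hf
    set n := lists.length with hn
    set L := List.range' 1 (n - 1) with hLdef
    set rem := L.filter (fun j => mask.getD j false) with hrem
    have hlt : ∀ j ∈ L, j < n := by
      intro j hj
      have := List.mem_range'_1.mp hj
      omega
    have hrne : rem ≠ [] := by
      intro h; rw [h] at hf; simp at hf
    -- unfold one step of A
    have hfuel : f + 1 + k = (f + k) + 1 := by omega
    rw [hfuel]
    have hEmp : rem.isEmpty = false := by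
      cases hrc : rem with
      | nil => exact absurd hrc hrne
      | cons a t => rfl
    simp only [pvLoopA]
    rw [if_neg (by simp [hEmp])]
    -- the two selections
    set counts := pvCounts n (pvIndex (pvNormSets lists)) ((pvNormSets lists).getD cur [])
      with hcounts
    have hov : ∀ j ∈ L, (fun j => mask.getD j false) j = true →
        count_common_pairs (lists.getD cur []) (lists.getD j []) = counts.getD j 0 := by
      intro j hj _
      exact lem_overlap lists cur j hc (hlt j hj)
    have hsel := lem_sel (fun j => counts.getD j 0)
      (fun j => count_common_pairs (lists.getD cur []) (lists.getD j []))
      (fun j => mask.getD j false) L hov none (-1) (-1) (Or.inl ⟨rfl, rfl⟩)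
    have hsome : ((pvSelA lists (lists.getD cur []) rem).1).isSome := by
      unfold pvSelA
      exact lem_sel_some _ (fun j => lem_ccp_nonneg _ _) rem hrne
    have hAst : pvSelA lists (lists.getD cur []) rem
        = (rem.foldl (fun st idx =>
            if count_common_pairs (lists.getD cur []) (lists.getD idx []) > st.2
            then (some idx, count_common_pairs (lists.getD cur []) (lists.getD idx []))
            else st) ((none : Option Nat), -1)) := rfl
    have hBst : pvSelB n mask counts
        = (L.foldl (fun st j =>
            if mask.getD j false && decide (counts.getD j 0 > st.2)
            then ((j : Int), counts.getD j 0) else st) (-1, -1)) := rfl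
    obtain ⟨-, hrel⟩ := hsel
    rcases hrel with ⟨hA1, -⟩ | ⟨b, hA1, hB1⟩
    · have hA1' : (pvSelA lists (lists.getD cur []) rem).1 = none := hA1
      rw [hA1'] at hsome
      simp at hsome
    · -- the selected index
      have hA1' : (pvSelA lists (lists.getD cur []) rem).1 = some b := hA1
      have hbmem : b ∈ rem := by
        have := lem_sel_mem
          (fun idx => count_common_pairs (lists.getD cur []) (lists.getD idx []))
          rem b ((none : Option Nat), -1) hA1'
        rcases this with h | h
        · simp at h
        · exact h
      have hbL : b ∈ L := List.mem_of_mem_filter hbmem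
      have hbmask : mask.getD b false = true := by
        have := List.of_mem_filter hbmem
        simpa using this
      have hbn : b < n := hlt b hbL
      -- A's match takes the `some` arm
      have hmatch : pvSelA lists (lists.getD cur []) rem
          = (some b, (pvSelA lists (lists.getD cur []) rem).2) := by
        rw [Prod.ext_iff]
        exact ⟨hA1', rfl⟩
      rw [hmatch]
      change pvLoopA lists (f + k) (lists.getD b []) (rem.erase b)
          (result ++ [lists.getD b []]) = _
      -- B's step
      have hbest : (pvSelB n mask counts).1.toNat = b := by
        rw [hBst, hB1]; simp
      -- erase = filter over updated mask
      have hmask' : (mask.set b false).length = n := by simpa [hn] using hm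
      have herase : rem.erase b
          = L.filter (fun j => (mask.set b false).getD j false) := by
        rw [hrem, lem_erase_filter L (List.nodup_range' 1 (by norm_num)) _ b]
        apply List.filter_congr
        intro x hx
        rw [lem_getD_set]
        by_cases hxb : x = b
        · subst hxb; simp [hm ▸ hbn]
        · simp [hxb, Ne.symm hxb]
      have hflen : (L.filter (fun j => (mask.set b false).getD j false)).length = f := by
        rw [← herase]
        have := List.length_erase_of_mem hbmem
        omega
      -- apply the IH
      rw [herase, ih k (mask.set b false) b (result ++ [lists.getD b []]) hmask' hbn hflen]
      -- unfold one step of B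
      simp only [pvLoopB]
      rw [hbest, lem_loopB_shift _ _ _ f b _ ([] ++ [b])]
      simp

-- ===== VERDICT (by name: the statement is the Claim_ definition above) =====
theorem sort_by_greedy_spec : Claim_equal_sort_by_greedy := by
  intro lists _
  show sort_by_greedy lists = sort_by_greedy_alt lists
  have halt : sort_by_greedy_alt lists
      = (if lists.length ≤ 1 then lists
        else (pvLoopB (pvNormSets lists) (pvIndex (pvNormSets lists)) lists.length
          (lists.length - 1) 0 (false :: List.replicate (lists.length - 1) true) [0]).map
            (fun i => lists.getD i [])) := rfl
  by_cases hle : lists.length ≤ 1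
  · rw [halt, if_pos hle]
    unfold sort_by_greedy
    rw [if_pos hle]
  · rw [halt, if_neg hle]
    unfold sort_by_greedy
    rw [if_neg hle]
    have hn2 : 2 ≤ lists.length := by omega
    set n := lists.length with hn
    set mask0 : List Bool := false :: List.replicate (n - 1) true with hmask0
    have hmlen : mask0.length = n := by simp [hmask0]; omega
    have hrem0 : (List.range' 1 (n - 1)).filter (fun j => mask0.getD j false)
        = List.range' 1 (n - 1) := by
      rw [List.filter_eq_self]
      intro j hj
      obtain ⟨h1, h2⟩ := List.mem_range'_1.mp hj
      rw [hmask0]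
      cases j with
      | zero => omega
      | succ i =>
        simp only [List.getD_cons_succ]
        rw [lem_getD_replicate]
        have hi : i < n - 1 := by omega
        simp [hi]
    have hflen : ((List.range' 1 (n - 1)).filter (fun j => mask0.getD j false)).length
        = n - 1 := by rw [hrem0]; simp
    have hmain := lem_main lists (n - 1) 1 mask0 0 [lists.getD 0 []] hmlen (by omega) hflen
    rw [hrem0] at hmain
    have hfuel : n - 1 + 1 = n := by omega
    rw [hfuel] at hmain
    rw [hmain]
    rw [lem_loopB_shift _ _ _ (n - 1) 0 mask0 ([0] : List Nat)]
    simp only [List.map_append, List.map_cons, List.map_nil, List.getD_eq_getElem?_getD]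
    rfl
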